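-- pv_equiv track=rewrite | github.com/roman9234/Statistics____university-homework | old_projects/prakt_3/imported_example/task1-7.py | randPeriod
-- ===== SOURCE A (Python) =====
-- def randPeriod(X):
--     result = []
--     n = len(X)
--
--     for i in range(n):
--         element = X[i]
--         for j in range(i, n):
--             if (element == X[j]) and (i != j):
--                 result.append(j-i)
--                 result.append(i)
--                 result.append(j)
--                 return result
--     result.append(-1)
--     result.append(-1)
--     result.append(-1)
--     return result
-- ===== SOURCE B (Python) =====
-- def randPeriod(X):
--     first = {}
--     best = None  # (i, j) with minimal i such that X[i] == X[j], i < j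
--     for j, v in enumerate(X):
--         i = first.setdefault(v, j)
--         if i != j and (best is None or i < best[0]):
--             best = (i, j)
--     if best is None:
--         return [-1, -1, -1]
--     return [best[1] - best[0], best[0], best[1]]
-- ===== Notes on version B (the rewrite author's own statement) =====
-- stated objective: alternative
-- what changed: Replaces A's nested index scans (for each i, scan all j>i for an equal element) by a single left-to-right pass that records each value's first occurrence in a dict and keeps the best pair (minimal first-occurrence index with a later equal element); intended as asymptotically faster (O(n) vs O(n^2) worst case) but a timing run measured only 1.46x at the largest size on its duplicate-heavy input family.
import Mathlib
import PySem

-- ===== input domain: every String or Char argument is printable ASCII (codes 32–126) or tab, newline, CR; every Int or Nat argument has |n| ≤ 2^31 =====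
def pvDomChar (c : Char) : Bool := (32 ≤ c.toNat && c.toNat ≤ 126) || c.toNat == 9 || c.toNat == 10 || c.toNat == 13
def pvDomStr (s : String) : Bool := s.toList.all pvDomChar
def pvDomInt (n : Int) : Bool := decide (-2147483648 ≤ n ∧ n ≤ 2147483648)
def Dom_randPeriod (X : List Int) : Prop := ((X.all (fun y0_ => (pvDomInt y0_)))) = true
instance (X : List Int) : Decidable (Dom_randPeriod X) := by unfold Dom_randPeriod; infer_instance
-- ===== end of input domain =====

-- B replaces A's nested index scans by one hash pass (first-occurrence dict + running best pair); return values are identical.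

-- ===== PORT A =====
-- inner 'for j in range(i, n): if element == X[j] and i != j: return [j-i, i, j]'
def aInner (X : List Int) (element : Int) (i : Int) : List Int → Option (List Int)
  | [] => none
  | j :: js =>
    match PySem.List.pyGet? X j with
    | none => none            -- IndexError (unreachable: j is in range)
    | some xj =>
      if element = xj ∧ i ≠ j then some [j - i, i, j] else aInner X element i js

-- outer 'for i in range(n): element = X[i]; <inner loop>'
def aOuter (X : List Int) : List Int → Option (List Int)
  | [] => none
  | i :: is =>
    match PySem.List.pyGet? X i with
    | none => none            -- IndexError (unreachable)
    | some element =>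
      match aInner X element i (PySem.List.pyRange i (PySem.List.len X) 1) with
      | some r => some r
      | none => aOuter X is

def randPeriod (X : List Int) : List Int :=
  (aOuter X (PySem.List.pyRange 0 (PySem.List.len X) 1)).getD [-1, -1, -1]

-- ===== PORT B =====
-- 'for j, v in enumerate(X): i = first.setdefault(v, j); if i != j and (best is None or i < best[0]): best = (i, j)'
def bLoop : List (Int × Int) → PySem.Dict Int Int → Option (Int × Int) → Option (Int × Int)
  | [], _, best => best
  | (j, v) :: rest, first, best =>
    match first.get? v with
    | none =>
      -- setdefault inserts j and returns i = j; then 'i != j' is False, best unchanged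
      bLoop rest (first.insert v j) best
    | some i =>
      if (i != j) && (match best with | none => true | some p => decide (i < p.1)) then
        bLoop rest first (some (i, j))
      else
        bLoop rest first best

def randPeriod_alt (X : List Int) : List Int :=
  match bLoop (PySem.List.enumerate X 0) PySem.Dict.empty none with
  | none => [-1, -1, -1]
  | some (i, j) => [j - i, i, j]

-- ===== PRECONDITION & SPEC =====
def Spec_randPeriod (X : List Int) (out : List Int) : Prop := out = randPeriod_alt X
instance (X : List Int) (out : List Int) : Decidable (Spec_randPeriod X out) := by unfold Spec_randPeriod; infer_instance

-- ===== CLAIM (what is proved, stated in full; the proofs are below) =====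
def Claim_equal_randPeriod : Prop := ∀ (X : List Int), Dom_randPeriod X → Spec_randPeriod X (randPeriod X)

-- ===== LEMMAS AND PROOFS =====

-- first index of v in a list (None if absent)
def firstIdx (v : Int) : List Int → Option Nat
  | [] => none
  | u :: t => if u = v then some 0 else (firstIdx v t).map (· + 1)

-- canonical answer: the least i having a later equal element, with the least such j
def sp : List Int → Option (Nat × Nat)
  | [] => none
  | u :: t =>
    match firstIdx u t with
    | some d => some (0, d + 1)
    | none => (sp t).map (fun p => (p.1 + 1, p.2 + 1))

def spRender (X : List Int) : List Int :=
  match sp X with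
  | none => [-1, -1, -1]
  | some p => [(p.2 : Int) - (p.1 : Int), (p.1 : Int), (p.2 : Int)]

theorem firstIdx_lt_length {v : Int} {l : List Int} {d : Nat}
    (h : firstIdx v l = some d) : d < l.length := by
  induction l generalizing d with
  | nil => simp [firstIdx] at h
  | cons u t ih =>
    simp only [firstIdx] at h
    split at h
    · simp_all; omega
    · cases hft : firstIdx v t with
      | none => rw [hft] at h; simp at h
      | some e => rw [hft] at h; simp at h; subst h; simpa using Nat.succ_lt_succ (ih hft)

theorem firstIdx_append_singleton (w v : Int) (l : List Int) :
    firstIdx w (l ++ [v]) =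
      match firstIdx w l with
      | some d => some d
      | none => if w = v then some l.length else none := by
  induction l with
  | nil => by_cases h : w = v <;> simp [firstIdx, h, Ne.symm]
  | cons u t ih =>
    by_cases h : u = w
    · simp [firstIdx, h]
    · simp only [List.cons_append, firstIdx, if_neg h, ih]
      cases hft : firstIdx w t with
      | none => by_cases hwv : w = v <;> simp [hwv]
      | some d => simp

theorem sp_append_singleton (v : Int) (l : List Int) :
    sp (l ++ [v]) =
      match firstIdx v l with
      | none => sp l
      | some i =>
        match sp l with
        | none => some (i, l.length)
        | some p => if i < p.1 then some (i, l.length) else sp l := by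
  induction l with
  | nil => simp [sp, firstIdx]
  | cons u t ih =>
    simp only [List.cons_append, sp, firstIdx_append_singleton]
    cases hut : firstIdx u t with
    | some d =>
      -- u repeats inside t already: answer (0, d+1) is unbeatable
      by_cases huv : u = v
      · simp [firstIdx, huv]
      · simp only [firstIdx, if_neg huv]
        cases hvt : firstIdx v t with
        | none => simp
        | some i => simp
    | none =>
      by_cases huv : u = v
      · -- the appended v duplicates the head u
        subst huv
        simp only [hut, firstIdx]
        cases hst : sp t with
        | none => simp
        | some p => simp
      · simp only [ih, firstIdx, if_neg huv]
        cases hvt : firstIdx v t with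
        | none => simp
        | some i =>
          cases hst : sp t with
          | none => simp
          | some p =>
            by_cases hip : i < p.1
            · simp [hip]
            · simp [hip]

theorem aInner_range (X : List Int) :
    ∀ (d b : Nat) (e : Int) (i : Int), b + d = X.length → i < (b : Int) →
      aInner X e i (PySem.List.pyRange (b : Int) (PySem.List.len X) 1)
        = (firstIdx e (X.drop b)).map
            (fun t => [((b + t : Nat) : Int) - i, i, ((b + t : Nat) : Int)]) := by
  intro d
  induction d with
  | zero =>
    intro b e i hb hi
    rw [PySem.List.pyRange_one_eq_nil (by simp [PySem.List.len_eq]; omega)]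
    simp [aInner, List.drop_eq_nil_of_le (by omega : X.length ≤ b), firstIdx]
  | succ d ih =>
    intro b e i hb hi
    have hblt : b < X.length := by omega
    rw [PySem.List.pyRange_one_cons (by simp [PySem.List.len_eq]; exact_mod_cast hblt)]
    simp only [aInner, PySem.List.pyGet?_natCast, List.getElem?_eq_getElem hblt]
    have hdrop : X.drop b = X[b] :: X.drop (b + 1) := List.drop_eq_getElem_cons hblt
    by_cases he : e = X[b]
    · rw [if_pos ⟨he, ne_of_lt hi⟩, hdrop]
      simp [firstIdx, he.symm]
    · rw [if_neg (by simp [he])]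
      have : ((b : Int) + 1) = ((b + 1 : Nat) : Int) := by push_cast; ring
      rw [this, ih (b + 1) e i (by omega) (by exact_mod_cast Int.lt_of_lt_of_le hi (by exact_mod_cast Nat.le_succ b))]
      rw [hdrop]
      simp only [firstIdx, if_neg (fun h : X[b] = e => he h.symm)]
      cases firstIdx e (X.drop (b + 1)) with
      | none => simp
      | some t =>
        simp only [Option.map_some]
        have h1 : (b + 1 + t : Nat) = (b + (t + 1) : Nat) := by omega
        rw [h1]

theorem aOuter_range (X : List Int) :
    ∀ (d a : Nat), a + d = X.length →
      aOuter X (PySem.List.pyRange (a : Int) (PySem.List.len X) 1)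
        = (sp (X.drop a)).map
            (fun p => [((a + p.2 : Nat) : Int) - ((a + p.1 : Nat) : Int),
                       ((a + p.1 : Nat) : Int), ((a + p.2 : Nat) : Int)]) := by
  intro d
  induction d with
  | zero =>
    intro a ha
    rw [PySem.List.pyRange_one_eq_nil (by simp [PySem.List.len_eq]; omega)]
    simp [aOuter, List.drop_eq_nil_of_le (by omega : X.length ≤ a), sp]
  | succ d ih =>
    intro a ha
    have halt : a < X.length := by omega
    have hcons := PySem.List.pyRange_one_cons
      (a := (a : Int)) (b := PySem.List.len X) (by simp [PySem.List.len_eq]; exact_mod_cast halt)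
    rw [hcons]
    simp only [aOuter, PySem.List.pyGet?_natCast, List.getElem?_eq_getElem halt]
    rw [hcons]
    simp only [aInner, PySem.List.pyGet?_natCast, List.getElem?_eq_getElem halt]
    rw [if_neg (by simp)]
    have hc : ((a : Int) + 1) = ((a + 1 : Nat) : Int) := by push_cast; ring
    rw [hc, aInner_range X d (a + 1) (X[a]) (a : Int) (by omega) (by push_cast; omega)]
    have hdrop : X.drop a = X[a] :: X.drop (a + 1) := List.drop_eq_getElem_cons halt
    cases hf : firstIdx (X[a]) (X.drop (a + 1)) with
    | some t =>
      simp only [Option.map_some]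
      rw [hdrop]
      simp only [sp, hf, Option.map_some]
      have h1 : (a + (t + 1) : Nat) = (a + 1 + t : Nat) := by omega
      have h2 : (a + 0 : Nat) = a := by omega
      rw [h1, h2]
    | none =>
      simp only [Option.map_none]
      rw [ih (a + 1) (by omega), hdrop]
      simp only [sp, hf]
      cases hsp : sp (X.drop (a + 1)) with
      | none => simp
      | some p =>
        simp only [Option.map_some]
        have h1 : (a + (p.1 + 1) : Nat) = (a + 1 + p.1 : Nat) := by omega
        have h2 : (a + (p.2 + 1) : Nat) = (a + 1 + p.2 : Nat) := by omega
        rw [h1, h2]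

theorem randPeriod_eq_spRender (X : List Int) : randPeriod X = spRender X := by
  unfold randPeriod spRender
  rw [show ((0 : Int)) = ((0 : Nat) : Int) from rfl,
      aOuter_range X X.length 0 (by omega), List.drop_zero]
  cases sp X with
  | none => simp
  | some p => simp

theorem bLoop_inv :
    ∀ (suf P : List Int) (first : PySem.Dict Int Int) (best : Option (Int × Int)),
      (∀ v, first.get? v = (firstIdx v P).map Int.ofNat) →
      best = (sp P).map (fun p => ((p.1 : Int), (p.2 : Int))) →
      bLoop (PySem.List.enumerate suf (P.length : Int)) first best
        = (sp (P ++ suf)).map (fun p => ((p.1 : Int), (p.2 : Int))) := by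
  intro suf
  induction suf with
  | nil =>
    intro P first best hfirst hbest
    simpa [PySem.List.enumerate_nil, bLoop] using hbest
  | cons v rest ih =>
    intro P first best hfirst hbest
    rw [PySem.List.enumerate_cons]
    simp only [bLoop]
    rw [hfirst v]
    have hassoc : P ++ v :: rest = (P ++ [v]) ++ rest := by simp
    have hlen : ((P.length : Int) + 1) = (((P ++ [v]).length : Nat) : Int) := by
      simp
    cases hf : firstIdx v P with
    | none =>
      simp only [Option.map_none]
      rw [hassoc, hlen]
      refine ih (P ++ [v]) _ _ ?_ ?_
      · intro w
        by_cases hw : w = v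
        · subst hw
          rw [PySem.Dict.get?_insert_self, firstIdx_append_singleton]
          simp [hf]
        · rw [PySem.Dict.get?_insert_of_ne _ _ hw, hfirst w, firstIdx_append_singleton]
          cases hfw : firstIdx w P with
          | none => simp [hw]
          | some u => simp
      · rw [sp_append_singleton v P]
        simp only [hf]
        exact hbest
    | some t =>
      simp only [Option.map_some]
      have ht : t < P.length := firstIdx_lt_length hf
      have hfirst' : ∀ w, first.get? w = (firstIdx w (P ++ [v])).map Int.ofNat := by
        intro w
        rw [hfirst w, firstIdx_append_singleton]
        cases hfw : firstIdx w P with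
        | some u => simp
        | none =>
          have hw : w ≠ v := by intro h; rw [h, hf] at hfw; cases hfw
          simp [hw]
      cases hsp : sp P with
      | none =>
        have hbn : best = none := by rw [hbest, hsp]; rfl
        rw [hbn]
        rw [if_pos (by simp; omega)]
        rw [hassoc, hlen]
        refine ih (P ++ [v]) _ _ hfirst' ?_
        rw [sp_append_singleton v P]
        simp [hf, hsp]
      | some p =>
        have hbs : best = some ((p.1 : Int), (p.2 : Int)) := by rw [hbest, hsp]; rfl
        rw [hbs]
        by_cases hlt : t < p.1
        · rw [if_pos (by simp; omega)]
          rw [hassoc, hlen]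
          refine ih (P ++ [v]) _ _ hfirst' ?_
          rw [sp_append_singleton v P]
          simp [hf, hsp, hlt]
        · rw [if_neg (by simp; omega)]
          rw [hassoc, hlen]
          refine ih (P ++ [v]) _ _ hfirst' ?_
          rw [sp_append_singleton v P]
          simp [hf, hsp, hlt]

theorem randPeriod_alt_eq_spRender (X : List Int) : randPeriod_alt X = spRender X := by
  unfold randPeriod_alt spRender
  have h := bLoop_inv X [] PySem.Dict.empty none
    (by intro w; simp [PySem.Dict.get?_empty, firstIdx]) (by simp [sp])
  simp only [List.length_nil, Nat.cast_zero, List.nil_append] at h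
  rw [h]
  cases sp X with
  | none => rfl
  | some p => rfl

-- ===== VERDICT (by name: the statement is the Claim_ definition above) =====
theorem randPeriod_spec : Claim_equal_randPeriod := by
  intro X _
  unfold Spec_randPeriod
  rw [randPeriod_eq_spRender, randPeriod_alt_eq_spRender]
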